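-- pv_equiv track=rewrite | github.com/G00PYW00PY/MA160-Study-App | MA160Gui.py | group_by_section
-- ===== SOURCE A (Python) =====
-- def group_by_section(problem_list):
--     grouped = {}
--
--     for section, prob in problem_list:
--         if section not in grouped:
--             grouped[section] = []
--         grouped[section].append(prob)
--
--     formatted = ""
--     for section in sorted(grouped.keys()):
--         probs = ", ".join(grouped[section])
--         formatted += f"Section {section}: {probs}\n\n"
--
--     return formatted if formatted else "None"
-- ===== SOURCE B (Python) =====
-- def group_by_section(problem_list):
--     ordered = sorted(problem_list, key=lambda pair: pair[0])
--     formatted = ""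
--     i, n = 0, len(ordered)
--     while i < n:
--         section = ordered[i][0]
--         j = i
--         while j < n and ordered[j][0] == section:
--             j += 1
--         probs = ", ".join(pair[1] for pair in ordered[i:j])
--         formatted += f"Section {section}: {probs}\n\n"
--         i = j
--     return formatted if formatted else "None"
-- ===== Notes on version B (the rewrite author's own statement) =====
-- stated objective: alternative
-- what changed: Replaces the dict-of-lists grouping pass plus sorted-keys lookup loop by a single stable sort of the pairs by section followed by one linear scan that formats each consecutive run of equal sections.
import Mathlib
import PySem

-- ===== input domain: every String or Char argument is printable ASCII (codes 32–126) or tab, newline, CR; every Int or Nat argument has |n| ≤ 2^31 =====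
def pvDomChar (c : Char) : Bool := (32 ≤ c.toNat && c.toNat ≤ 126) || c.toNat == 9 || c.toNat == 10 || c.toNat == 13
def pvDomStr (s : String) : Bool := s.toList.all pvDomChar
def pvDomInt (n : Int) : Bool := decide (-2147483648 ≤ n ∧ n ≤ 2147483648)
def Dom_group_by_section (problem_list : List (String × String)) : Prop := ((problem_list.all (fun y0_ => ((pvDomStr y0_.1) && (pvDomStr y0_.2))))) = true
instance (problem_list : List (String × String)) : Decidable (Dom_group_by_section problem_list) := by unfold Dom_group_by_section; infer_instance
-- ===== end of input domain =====

-- B replaces A's dict-of-lists grouping + sorted-keys loop by one stable sort of the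
-- pairs by section and a single scan over consecutive runs (objective: alternative).

-- ===== PORT A =====
def group_by_section (problem_list : List (String × String)) : String :=
  let grouped : PySem.Dict String (List String) :=
    problem_list.foldl (fun grouped sp =>
      let grouped := if grouped.contains sp.1 then grouped else grouped.insert sp.1 []
      grouped.insert sp.1 (grouped.getD sp.1 [] ++ [sp.2])) PySem.Dict.empty
  let formatted :=
    (PySem.List.sorted grouped.keys (fun k => k) false).foldl
      (fun formatted s =>
        let probs := PySem.Str.join ", " (grouped.getD s [])
        formatted ++ ("Section " ++ s ++ ": " ++ probs ++ "\n\n")) ""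
  if formatted = "" then "None" else formatted

-- ===== PORT B =====
-- the inner index scan 'while j < n and ordered[j][0] == section' is ported as
-- takeWhile/dropWhile of the same predicate on the remaining suffix (exact)
def altFmt (formatted : String) : List (String × String) → String
  | [] => formatted
  | (s, p) :: t =>
      let probs := PySem.Str.join ", " (((s, p) :: t.takeWhile (fun q => q.1 == s)).map (fun q => q.2))
      altFmt (formatted ++ ("Section " ++ s ++ ": " ++ probs ++ "\n\n")) (t.dropWhile (fun q => q.1 == s))
  termination_by l => l.length
  decreasing_by
    exact Nat.lt_succ_of_le (List.Sublist.length_le (List.dropWhile_sublist _))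

def group_by_section_alt (problem_list : List (String × String)) : String :=
  let ordered := PySem.List.sorted problem_list (fun pair => pair.1) false
  let formatted := altFmt "" ordered
  if formatted = "" then "None" else formatted

-- ===== PRECONDITION & SPEC =====
def Spec_group_by_section (problem_list : List (String × String)) (out : String) : Prop := out = group_by_section_alt problem_list
instance (problem_list : List (String × String)) (out : String) : Decidable (Spec_group_by_section problem_list out) := by unfold Spec_group_by_section; infer_instance

-- ===== CLAIM (what is proved, stated in full; the proofs are below) =====
def Claim_equal_group_by_section : Prop := ∀ (problem_list : List (String × String)), Dom_group_by_section problem_list → Spec_group_by_section problem_list (group_by_section problem_list)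

-- ===== LEMMAS AND PROOFS =====

-- inserting x into a key-sorted list appends x at the end of the elements with key x
theorem pv_ins_filter (k : String) (x : String × String) (ys : List (String × String))
    (hys : ys.Pairwise (fun a b => a.1 ≤ b.1)) :
    (PySem.List.insertBy (fun a b => decide (a.1 < b.1)) x ys).filter (fun q => q.1 == k) =
      if x.1 == k then ys.filter (fun q => q.1 == k) ++ [x]
      else ys.filter (fun q => q.1 == k) := by
  induction ys with
  | nil =>
      by_cases hxk : x.1 = k <;> simp [PySem.List.insertBy, List.filter, hxk]
  | cons y ys ih =>
      rw [List.pairwise_cons] at hys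
      rw [PySem.List.insertBy]
      by_cases hlt : x.1 < y.1
      · simp only [hlt, decide_true, if_true]
        by_cases hxk : x.1 = k
        · have hnil : (y :: ys).filter (fun q => q.1 == k) = [] := by
            apply List.filter_eq_nil_iff.mpr
            intro q hq h
            have hgt : x.1 < q.1 := by
              rcases List.mem_cons.mp hq with hq1 | hq2
              · subst hq1; exact hlt
              · exact lt_of_lt_of_le hlt (hys.1 q hq2)
            have : q.1 = k := by simpa using h
            rw [hxk, this] at hgt
            exact absurd hgt (lt_irrefl k)
          rw [List.filter_cons_of_pos (by simpa using hxk), hnil]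
          simp [hxk]
        · have h1 : (x :: y :: ys).filter (fun q => q.1 == k) = (y :: ys).filter (fun q => q.1 == k) :=
            List.filter_cons_of_neg (by simpa using hxk)
          simp only [h1, beq_iff_eq, hxk]
          simp
      · simp only [hlt, decide_false, Bool.false_eq_true, if_false]
        have ihh := ih hys.2
        by_cases hyk : y.1 = k
        · rw [List.filter_cons_of_pos (by simpa using hyk),
              List.filter_cons_of_pos (by simpa using hyk), ihh]
          by_cases hxk : x.1 = k <;> simp [hxk]
        · rw [List.filter_cons_of_neg (by simpa using hyk),
              List.filter_cons_of_neg (by simpa using hyk), ihh]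
-- a whole insertion-sort fold appends the elements with key k behind those already sorted
theorem pv_fold_filter (k : String) :
    ∀ (xs acc : List (String × String)), acc.Pairwise (fun a b => a.1 ≤ b.1) →
    (xs.foldl (fun acc x => PySem.List.insertBy (fun a b => decide (a.1 < b.1)) x acc) acc).filter
        (fun q => q.1 == k) =
      acc.filter (fun q => q.1 == k) ++ xs.filter (fun q => q.1 == k) := by
  intro xs
  induction xs with
  | nil => intro acc _; simp
  | cons x xs ih =>
      intro acc hacc
      rw [List.foldl_cons,
        ih _ (PySem.List.insertBy_pairwise_le (fun q => q.1) x acc hacc),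
        pv_ins_filter k x acc hacc]
      by_cases hxk : x.1 = k <;>
        simp [hxk, List.append_assoc]

-- stability of Python's sort: the elements with key k keep their original order
theorem pv_stab (pl : List (String × String)) (k : String) :
    (PySem.List.sorted pl (fun pair => pair.1) false).filter (fun q => q.1 == k) =
      pl.filter (fun q => q.1 == k) := by
  rw [PySem.List.sorted_eq_foldl_insertBy]
  simpa using pv_fold_filter k pl [] List.Pairwise.nil

theorem pv_add_cons (s : String) :
    ∀ (l acc : List String), s ∉ l →
    List.foldl PySem.Set.add (s :: acc) l = s :: List.foldl PySem.Set.add acc l := by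
  intro l
  induction l with
  | nil => intro acc _; rfl
  | cons x l ih =>
      intro acc hs
      have hxs : (x == s) = false := by
        simp only [beq_eq_false_iff_ne, ne_eq]
        intro h; exact hs (by simp [h])
      have hsl : s ∉ l := fun h => hs (by simp [h])
      simp only [List.foldl_cons, PySem.Set.add, PySem.Set.contains, List.contains_cons, hxs,
        Bool.false_or]
      by_cases hc : acc.contains x = true
      · rw [if_pos hc, if_pos hc]; exact ih acc hsl
      · rw [if_neg hc, if_neg hc, List.cons_append]
        exact ih (acc ++ [x]) hsl

theorem pv_add_absorb :
    ∀ (l acc : List String), (∀ x ∈ l, x ∈ acc) →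
    List.foldl PySem.Set.add acc l = acc := by
  intro l
  induction l with
  | nil => intro acc _; rfl
  | cons x l ih =>
      intro acc h
      have hc : PySem.Set.contains acc x = true := by
        simp [PySem.Set.contains]; exact h x (by simp)
      simp only [List.foldl_cons, PySem.Set.add, hc, if_true]
      exact ih acc (fun y hy => h y (by simp [hy]))

theorem pv_ofList_sublist :
    ∀ (l acc : List String), (List.foldl PySem.Set.add acc l).Sublist (acc ++ l) := by
  intro l
  induction l with
  | nil => intro acc; simp
  | cons x l ih =>
      intro acc
      by_cases hc : PySem.Set.contains acc x
      · simp only [List.foldl_cons, PySem.Set.add, hc, if_true]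
        exact (ih acc).trans (List.Sublist.append_left (List.sublist_cons_self x l) acc)
      · simp only [List.foldl_cons, PySem.Set.add, hc]
        simpa [List.append_assoc] using ih (acc ++ [x])

-- after dropping the leading run of key s, every remaining key is strictly greater
theorem pv_gt_dropWhile (s : String) :
    ∀ t : List (String × String), t.Pairwise (fun a b => a.1 ≤ b.1) →
    (∀ q ∈ t, s ≤ q.1) → ∀ q ∈ t.dropWhile (fun q => q.1 == s), s < q.1 := by
  intro t
  induction t with
  | nil => intro _ _ q hq; simp at hq
  | cons y t ih =>
      intro hp hge q hq
      rw [List.pairwise_cons] at hp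
      by_cases hy : y.1 = s
      · rw [List.dropWhile_cons_of_pos (by simpa using hy)] at hq
        exact ih hp.2 (fun r hr => hge r (by simp [hr])) q hq
      · rw [List.dropWhile_cons_of_neg (by simpa using hy)] at hq
        have hys : s < y.1 := lt_of_le_of_ne (hge y (by simp)) (Ne.symm hy)
        rcases List.mem_cons.mp hq with h | h
        · subst h; exact hys
        · exact lt_of_lt_of_le hys (hp.1 q h)

-- in a key-sorted list the elements with the minimal key form the initial run
theorem pv_filter_takeWhile (s : String) :
    ∀ t : List (String × String), t.Pairwise (fun a b => a.1 ≤ b.1) →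
    (∀ q ∈ t, s ≤ q.1) →
    t.filter (fun q => q.1 == s) = t.takeWhile (fun q => q.1 == s) := by
  intro t
  induction t with
  | nil => intro _ _; rfl
  | cons y t ih =>
      intro hp hge
      rw [List.pairwise_cons] at hp
      by_cases hy : y.1 = s
      · rw [List.filter_cons_of_pos (by simpa using hy),
          List.takeWhile_cons_of_pos (by simpa using hy),
          ih hp.2 (fun r hr => hge r (by simp [hr]))]
      · rw [List.filter_cons_of_neg (by simpa using hy),
          List.takeWhile_cons_of_neg (by simpa using hy)]
        apply List.filter_eq_nil_iff.mpr
        intro q hq h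
        have hys : s < y.1 := lt_of_le_of_ne (hge y (by simp)) (Ne.symm hy)
        have : s < q.1 := lt_of_lt_of_le hys (hp.1 q hq)
        have hqk : q.1 = s := by simpa using h
        rw [hqk] at this
        exact absurd this (lt_irrefl s)

-- first-occurrence key list of a key-sorted nonempty list: head key, then the keys of the rest
theorem pv_keys_cons (s : String) (p : String) (t : List (String × String))
    (hp : ((s, p) :: t).Pairwise (fun a b => a.1 ≤ b.1)) :
    PySem.Set.ofList (((s, p) :: t).map (fun q => q.1)) =
      s :: PySem.Set.ofList ((t.dropWhile (fun q => q.1 == s)).map (fun q => q.1)) := by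
  rw [List.pairwise_cons] at hp
  have htB : ∀ x ∈ (t.takeWhile (fun q => q.1 == s)).map (fun q => q.1), x ∈ [s] := by
    intro x hx
    rcases List.mem_map.mp hx with ⟨q, hq, hqx⟩
    have := List.mem_takeWhile_imp hq
    simp at this
    simp [← hqx, this]
  have hsR : s ∉ (t.dropWhile (fun q => q.1 == s)).map (fun q => q.1) := by
    intro hmem
    rcases List.mem_map.mp hmem with ⟨q, hq, hqx⟩
    have := pv_gt_dropWhile s t hp.2 hp.1 q hq
    rw [hqx] at this
    exact absurd this (lt_irrefl s)
  conv_lhs => rw [← List.takeWhile_append_dropWhile (p := fun q => q.1 == s) (l := t)]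
  rw [PySem.Set.ofList_eq_foldl]
  simp only [List.map_cons, List.map_append, List.foldl_cons, List.foldl_append]
  have h0 : PySem.Set.add ([] : List String) s = [s] := rfl
  rw [h0, pv_add_absorb _ [s] htB, pv_add_cons s _ [] hsR, PySem.Set.ofList_eq_foldl]

-- the formatting scan over a key-sorted list = the fold over its distinct keys in order
theorem pv_mainFmt :
    ∀ (n : Nat) (S : List (String × String)), S.length ≤ n →
    S.Pairwise (fun a b => a.1 ≤ b.1) → ∀ acc : String,
    altFmt acc S =
      (PySem.Set.ofList (S.map (fun q => q.1))).foldl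
        (fun a k => a ++ ("Section " ++ k ++ ": " ++
          PySem.Str.join ", " ((S.filter (fun q => q.1 == k)).map (fun q => q.2)) ++ "\n\n")) acc := by
  intro n
  induction n with
  | zero =>
      intro S hlen _ acc
      have : S = [] := List.eq_nil_of_length_eq_zero (Nat.le_zero.mp hlen)
      subst this
      simp [altFmt, PySem.Set.ofList]
  | succ n ih =>
      intro S hlen hp acc
      match S with
      | [] => simp [altFmt, PySem.Set.ofList]
      | (s, p) :: t =>
        rw [List.pairwise_cons] at hp
        rw [altFmt, pv_keys_cons s p t (List.pairwise_cons.mpr hp), List.foldl_cons]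
        have hfil : (((s, p) :: t).filter (fun q => q.1 == s)) =
            (s, p) :: t.takeWhile (fun q => q.1 == s) := by
          rw [List.filter_cons_of_pos (by simp), pv_filter_takeWhile s t hp.2 hp.1]
        have hR : ∀ (a : String) (k : String),
            k ∈ PySem.Set.ofList ((t.dropWhile (fun q => q.1 == s)).map (fun q => q.1)) →
            (a ++ ("Section " ++ k ++ ": " ++
              PySem.Str.join ", " (((((s, p) :: t)).filter (fun q => q.1 == k)).map (fun q => q.2)) ++ "\n\n")) =
            (a ++ ("Section " ++ k ++ ": " ++
              PySem.Str.join ", " (((t.dropWhile (fun q => q.1 == s)).filter (fun q => q.1 == k)).map (fun q => q.2)) ++ "\n\n")) := by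
          intro a k hk
          have hk' : k ∈ (t.dropWhile (fun q => q.1 == s)).map (fun q => q.1) :=
            (PySem.Set.mem_ofList _ _).mp hk
          rcases List.mem_map.mp hk' with ⟨q, hq, hqk⟩
          have hsk : s < k := by
            have := pv_gt_dropWhile s t hp.2 hp.1 q hq
            rwa [hqk] at this
          have hks : ¬(s = k) := fun h => absurd (h ▸ hsk) (lt_irrefl s)
          have hfk : (((s, p) :: t).filter (fun q => q.1 == k)) =
              (t.dropWhile (fun q => q.1 == s)).filter (fun q => q.1 == k) := by
            conv_lhs => rw [← List.takeWhile_append_dropWhile (p := fun q => q.1 == s) (l := t)]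
            rw [List.filter_cons_of_neg (by simpa using hks), List.filter_append]
            have : (t.takeWhile (fun q => q.1 == s)).filter (fun q => q.1 == k) = [] := by
              apply List.filter_eq_nil_iff.mpr
              intro q' hq' h'
              have hq's := List.mem_takeWhile_imp hq'
              simp at hq's h'
              exact hks (hq's ▸ h')
            rw [this, List.nil_append]
          rw [hfk]
        rw [PySem.List.foldl_congr_mem _ _ _ _
          (fun a k hk => hR a k hk)]
        have hlen' : (t.dropWhile (fun q => q.1 == s)).length ≤ n := by
          have h1 := List.Sublist.length_le (List.dropWhile_sublist (p := fun q => q.1 == s) (l := t))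
          simp at hlen
          omega
        have hp' : (t.dropWhile (fun q => q.1 == s)).Pairwise (fun a b => a.1 ≤ b.1) :=
          List.Pairwise.sublist (List.dropWhile_sublist _) hp.2
        rw [← ih _ hlen' hp']
        simp only [hfil]

-- A's dict body is one 'modify' step
theorem pv_body_eq (d : PySem.Dict String (List String)) (sp : String × String) :
    (if d.contains sp.1 = true then d else d.insert sp.1 []).insert sp.1
      ((if d.contains sp.1 = true then d else d.insert sp.1 []).getD sp.1 [] ++ [sp.2]) =
    d.modify sp.1 [] (fun v => v ++ [sp.2]) := by
  by_cases hc : d.contains sp.1 = true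
  · rw [if_pos hc]; rfl
  · rw [if_neg hc, PySem.Dict.getD_insert_self, PySem.Dict.insert_insert_self,
      PySem.Dict.modify, PySem.Dict.getD_of_not_contains d [] (by simpa using hc)]

theorem pv_main_eq (pl : List (String × String)) :
    group_by_section pl = group_by_section_alt pl := by
  simp only [group_by_section, group_by_section_alt]
  rw [PySem.List.foldl_congr_mem pl _ (fun d sp => d.modify sp.1 [] (fun v => v ++ [sp.2]))
      PySem.Dict.empty (fun acc x _ => pv_body_eq acc x)]
  have hgetD : ∀ k : String,
      (pl.foldl (fun d sp => d.modify sp.1 [] (fun v => v ++ [sp.2])) PySem.Dict.empty).getD k [] =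
        (pl.filter (fun q => q.1 == k)).map (fun q => q.2) := by
    intro k
    simpa [PySem.Dict.getD_empty] using PySem.Dict.getD_foldl_modify_append pl PySem.Dict.empty k
  have hkeys :
      (pl.foldl (fun d sp => d.modify sp.1 [] (fun v => v ++ [sp.2])) PySem.Dict.empty).keys =
        PySem.Set.ofList (pl.map (fun q => q.1)) := by
    rw [PySem.Dict.keys_foldl_modify_key pl (fun sp => sp.1) [] (fun d sp v => v ++ [sp.2])
        PySem.Dict.empty]
    rw [PySem.Dict.keys_empty, PySem.Set.update, PySem.Set.ofList_eq_foldl]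
  simp only [hgetD, hkeys]
  have hpS : (PySem.List.sorted pl (fun pair => pair.1) false).Pairwise (fun a b => a.1 ≤ b.1) :=
    PySem.List.sorted_pairwise pl (fun pair => pair.1)
  have hks : PySem.List.sorted (PySem.Set.ofList (pl.map (fun q => q.1))) (fun k => k) false =
      PySem.Set.ofList ((PySem.List.sorted pl (fun pair => pair.1) false).map (fun q => q.1)) := by
    have hmem : ∀ x, x ∈ PySem.Set.ofList (pl.map (fun q => q.1)) ↔
        x ∈ PySem.Set.ofList ((PySem.List.sorted pl (fun pair => pair.1) false).map (fun q => q.1)) := by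
      intro x
      rw [PySem.Set.mem_ofList, PySem.Set.mem_ofList]
      exact (List.Perm.mem_iff ((PySem.List.sorted_perm pl (fun pair => pair.1) false).map
        (fun q => q.1))).symm
    have hperm := (List.perm_ext_iff_of_nodup
      (PySem.Set.nodup_ofList (pl.map (fun q => q.1)))
      (PySem.Set.nodup_ofList ((PySem.List.sorted pl (fun pair => pair.1) false).map (fun q => q.1)))).mpr hmem
    rw [PySem.List.sorted_eq_sorted_of_perm _ _ _ (fun a b h => h) hperm]
    apply PySem.List.sorted_eq_self_of_pairwise
    exact List.Pairwise.sublist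
      (by simpa using pv_ofList_sublist ((PySem.List.sorted pl (fun pair => pair.1) false).map (fun q => q.1)) [])
      (PySem.List.sorted_map_key_pairwise pl (fun pair => pair.1))
  rw [hks]
  simp only [← pv_stab pl]
  rw [← pv_mainFmt (PySem.List.sorted pl (fun pair => pair.1) false).length _ le_rfl hpS ""]

-- ===== VERDICT (by name: the statement is the Claim_ definition above) =====
theorem group_by_section_spec : Claim_equal_group_by_section := by
  intro pl _
  exact pv_main_eq pl
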